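-- pv_equiv track=rewrite | github.com/dakkenkd/AtCoder | icpc/D.py | cut2
-- ===== SOURCE A (Python) =====
-- def cut2(ss):
--     lst = []
--     buf = []
--     for i in range(len(ss)):
--         if len(buf) == 0:
--             buf.append(ss[i])
--         else:
--             if buf[-1] < ss[i]:
--                 lst.append(buf)
--                 buf = [ss[i]]
--             else:
--                 buf.append(ss[i])
--     if len(buf) >= 1:
--         lst.append(buf)
--     return lst
-- ===== SOURCE B (Python) =====
-- def cut2(ss):
--     # Right-to-left pass: build each run reversed, flush on a descent (seen from the
--     # right), reverse everything at the end.  Same return value as the buffer version.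
--     out = []
--     run = []
--     prev = None
--     for x in reversed(ss):
--         if prev is not None and x < prev:
--             run.reverse()
--             out.append(run)
--             run = []
--         run.append(x)
--         prev = x
--     if run:
--         run.reverse()
--         out.append(run)
--     out.reverse()
--     return out
-- ===== Notes on version B (the rewrite author's own statement) =====
-- stated objective: alternative
-- what changed: B traverses the list right-to-left, building each run reversed and flushing it on a descent with bulk list.reverse() calls, then reverses the accumulated runs at the end, instead of A's left-to-right buffer accumulation with forward flushes.
import Mathlib
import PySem

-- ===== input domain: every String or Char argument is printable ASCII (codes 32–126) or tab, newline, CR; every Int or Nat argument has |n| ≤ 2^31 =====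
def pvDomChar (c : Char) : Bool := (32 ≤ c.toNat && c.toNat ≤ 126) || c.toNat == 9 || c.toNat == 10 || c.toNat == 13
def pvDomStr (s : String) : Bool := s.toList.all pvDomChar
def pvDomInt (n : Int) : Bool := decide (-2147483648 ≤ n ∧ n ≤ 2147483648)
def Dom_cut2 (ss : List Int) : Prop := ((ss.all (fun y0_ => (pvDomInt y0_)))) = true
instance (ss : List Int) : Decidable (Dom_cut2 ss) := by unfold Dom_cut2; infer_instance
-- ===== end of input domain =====

-- B traverses the list right-to-left (different traversal order / decomposition), same value; equivalence on all inputs.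

-- ===== PORT A =====
-- A iterates `for i in range(len(ss))` reading ss[i] in order: ported as a left fold
-- over ss with the same (lst, buf) state; buf[-1] is PySem.List.pyGet? buf (-1).
def stepA (st : List (List Int) × List Int) (x : Int) : List (List Int) × List Int :=
  let lst := st.1
  let buf := st.2
  if buf.length = 0 then (lst, buf ++ [x])
  else if (PySem.List.pyGet? buf (-1)).getD 0 < x then (lst ++ [buf], [x])
  else (lst, buf ++ [x])

def cut2 (ss : List Int) : List (List Int) :=
  let st := ss.foldl stepA ([], [])
  if st.2.length ≥ 1 then st.1 ++ [st.2] else st.1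

-- ===== PORT B =====
-- `for x in reversed(ss)` is a left fold over ss.reverse with state (out, run, prev);
-- run.reverse/out.reverse mirror the in-place .reverse() calls.
def stepB (st : List (List Int) × List Int × Option Int) (x : Int) :
    List (List Int) × List Int × Option Int :=
  let out := st.1
  let run := st.2.1
  let prev := st.2.2
  match prev with
  | some p =>
      if x < p then (out ++ [run.reverse], [x], some x)
      else (out, run ++ [x], some x)
  | none => (out, run ++ [x], some x)

def cut2_alt (ss : List Int) : List (List Int) :=
  let st := ss.reverse.foldl stepB ([], [], none)
  (if st.2.1 ≠ [] then st.1 ++ [st.2.1.reverse] else st.1).reverse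

-- ===== PRECONDITION & SPEC =====
def Spec_cut2 (ss : List Int) (out : List (List Int)) : Prop := out = cut2_alt ss
instance (ss : List Int) (out : List (List Int)) : Decidable (Spec_cut2 ss out) := by unfold Spec_cut2; infer_instance

-- ===== CLAIM =====
def Claim_equal_cut2 : Prop := ∀ (ss : List Int), Dom_cut2 ss → Spec_cut2 ss (cut2 ss)

-- ===== LEMMAS AND PROOFS =====
-- Reference: `ext buf ss` = the runs obtained when the nonempty buffer buf is continued by ss.
def ext (buf : List Int) : List Int → List (List Int)
  | [] => [buf]
  | x :: t =>
      if (PySem.List.pyGet? buf (-1)).getD 0 < x then buf :: ext [x] t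
      else ext (buf ++ [x]) t

def runsOf : List Int → List (List Int)
  | [] => []
  | x :: t => ext [x] t

theorem ext_ne_nil (t : List Int) : ∀ buf, ext buf t ≠ [] := by
  induction t with
  | nil => intro buf; simp [ext]
  | cons x t ih => intro buf; simp only [ext]; split <;> simp [ih]

theorem lastD_cons {z : Int} {buf : List Int} (h : buf ≠ []) :
    (PySem.List.pyGet? (z :: buf) (-1)).getD 0 = (PySem.List.pyGet? buf (-1)).getD 0 := by
  cases buf with
  | nil => exact absurd rfl h
  | cons a l =>
    rw [PySem.List.pyGet?_neg_one, PySem.List.pyGet?_neg_one, List.getLast?_cons_cons]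

theorem ext_cons (t : List Int) : ∀ (buf : List Int) (z : Int), buf ≠ [] →
    ext (z :: buf) t = (z :: (ext buf t).headI) :: (ext buf t).tail := by
  induction t with
  | nil => intro buf z h; simp [ext]
  | cons x t ih =>
    intro buf z h
    simp only [ext, lastD_cons h]
    split
    · simp
    · rw [List.cons_append, ih (buf ++ [x]) z (by simp)]

theorem runsOf_decomp {u : List Int} (h : u ≠ []) :
    runsOf u = (runsOf u).headI :: (runsOf u).tail := by
  match u with
  | y :: t =>
    have := ext_ne_nil t [y]
    cases hr : ext [y] t with
    | nil => exact absurd hr this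
    | cons a b => simp [runsOf, hr]

-- A-side invariant
theorem foldA_inv (ss : List Int) : ∀ (lst : List (List Int)) (buf : List Int), buf ≠ [] →
    (let st := ss.foldl stepA (lst, buf)
     if st.2.length ≥ 1 then st.1 ++ [st.2] else st.1) = lst ++ ext buf ss := by
  induction ss with
  | nil =>
    intro lst buf h
    have : buf.length ≥ 1 := by cases buf <;> simp_all
    simp [ext, this]
  | cons x t ih =>
    intro lst buf h
    have hlen : ¬ buf.length = 0 := by cases buf <;> simp_all
    simp only [List.foldl_cons, stepA, hlen, if_false, ext]
    split
    · rw [ih (lst ++ [buf]) [x] (by simp)]; simp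
    · rw [ih lst (buf ++ [x]) (by simp)]

theorem cut2_eq_runsOf (ss : List Int) : cut2 ss = runsOf ss := by
  cases ss with
  | nil => simp [cut2, runsOf]
  | cons x t =>
    have := foldA_inv t [] [x] (by simp)
    simpa [cut2, runsOf] using this

theorem ext_headI_ne_nil (t : List Int) : ∀ buf, buf ≠ [] → (ext buf t).headI ≠ [] := by
  induction t with
  | nil => intro buf h; simpa [ext]
  | cons x t ih =>
    intro buf h
    simp only [ext]
    split
    · simpa
    · exact ih (buf ++ [x]) (by simp)

-- B-side invariant: state after the right-to-left fold over t
theorem foldB_inv (t : List Int) :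
    (t.foldr (fun x st => stepB st x) ([], [], none)) =
    ((runsOf t).tail.reverse, (runsOf t).headI.reverse, t.head?) := by
  induction t with
  | nil => simp [runsOf]; rfl
  | cons y u ih =>
    rw [List.foldr_cons, ih]
    cases u with
    | nil => simp [runsOf, ext, stepB]; rfl
    | cons z w =>
      simp only [List.head?_cons, stepB]
      have hy : (PySem.List.pyGet? [y] (-1)).getD 0 = y := by
        simp [PySem.List.pyGet?_neg_one]
      have hd := runsOf_decomp (u := z :: w) (by simp)
      by_cases hlt : y < z
      · simp only [runsOf, ext, hy, hlt, if_true, Prod.mk.injEq]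
        refine ⟨?_, by simp, trivial⟩
        rw [List.reverse_reverse, List.tail_cons]
        have hd' : ext [z] w = (ext [z] w).headI :: (ext [z] w).tail := hd
        conv_rhs => rw [hd']
        rw [List.reverse_cons]
      · simp only [runsOf, ext, hy, hlt, if_false]
        rw [show [y] ++ [z] = y :: [z] from rfl, ext_cons w [z] y (by simp)]
        simp [show ext [z] w = runsOf (z :: w) from rfl]

theorem cut2_alt_eq_runsOf (ss : List Int) : cut2_alt ss = runsOf ss := by
  unfold cut2_alt
  rw [List.foldl_reverse, foldB_inv ss]
  cases ss with
  | nil => simp [runsOf]; rfl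
  | cons x t =>
    have h2 : (runsOf (x :: t)).headI.reverse ≠ [] := by
      simpa using ext_headI_ne_nil t [x] (by simp)
    simp only [h2, ne_eq, not_false_iff, if_true]
    rw [List.reverse_append, List.reverse_reverse, List.reverse_reverse]
    simp only [List.reverse_cons, List.reverse_nil, List.nil_append,
      List.singleton_append]
    exact (runsOf_decomp (u := x :: t) (by simp)).symm

-- ===== VERDICT =====
theorem cut2_spec : Claim_equal_cut2 := by
  intro ss _
  unfold Spec_cut2
  rw [cut2_eq_runsOf, cut2_alt_eq_runsOf]
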